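-- pv_equiv track=rewrite | github.com/yustero/csb | 4_state_project/programs/first_implementation/ising_anal.py | steady_check
-- ===== SOURCE A (Python) =====
-- def evolve_ising(nodes_state,adj,pos):
--
--     n=len(adj)
--     adj_sum=0
--     buffer=nodes_state.copy()
--
--     for i in range(0,n):
--         adj_sum+= (nodes_state[i]*adj[i][pos])
--     if adj_sum>0:
--         buffer[pos]=1
--
--
--     elif adj_sum<0:
--         buffer[pos]=-1
--
--     elif adj_sum==0:
--         buffer[pos]=buffer[pos]
--     return(buffer)
--
-- def steady_check(nodes,adj):
--     n=len(adj)
--     count=0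
--     for i in range(0,n):
--         if evolve_ising(nodes,adj,i)[i]!= nodes[i]:
--
--            count+=1
--
--     if count==0:
--         return(True)
--     else:
--         return(False)
-- ===== SOURCE B (Python) =====
-- def steady_check(nodes, adj):
--     n = len(adj)
--     # group the row indices into buckets keyed by the node's spin value (zero spins
--     # contribute nothing and are skipped entirely)
--     groups = {}
--     for i in range(n):
--         v = nodes[i]
--         if v == 0:
--             continue
--         groups.setdefault(v, []).append(i)
--     # sum each bucket's rows once, then combine the buckets weighted by their value:
--     # sums[pos] == sum_i nodes[i]*adj[i][pos]
--     sums = [0] * n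
--     for v, idxs in groups.items():
--         block = [0] * n
--         for i in idxs:
--             block = [b + r for b, r in zip(block, adj[i])]
--         sums = [s + v * b for s, b in zip(sums, block)]
--     # separate early-exit comparison pass
--     for i, s in enumerate(sums):
--         if s > 0:
--             if nodes[i] != 1:
--                 return False
--         elif s < 0:
--             if nodes[i] != -1:
--                 return False
--     return True
-- ===== Notes on version B (the rewrite author's own statement) =====
-- stated objective: faster
-- what changed: B groups the row indices into buckets keyed by the node's spin value, sums each bucket's rows once and combines the buckets weighted by the value to get the column-sum vector (k*n multiplications for k distinct nonzero values, zero spins skipped, no per-column state copies), then compares signs in a separate early-exit pass; A instead recomputes a full dot product and copies the whole state per column via evolve_ising.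
import Mathlib
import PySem

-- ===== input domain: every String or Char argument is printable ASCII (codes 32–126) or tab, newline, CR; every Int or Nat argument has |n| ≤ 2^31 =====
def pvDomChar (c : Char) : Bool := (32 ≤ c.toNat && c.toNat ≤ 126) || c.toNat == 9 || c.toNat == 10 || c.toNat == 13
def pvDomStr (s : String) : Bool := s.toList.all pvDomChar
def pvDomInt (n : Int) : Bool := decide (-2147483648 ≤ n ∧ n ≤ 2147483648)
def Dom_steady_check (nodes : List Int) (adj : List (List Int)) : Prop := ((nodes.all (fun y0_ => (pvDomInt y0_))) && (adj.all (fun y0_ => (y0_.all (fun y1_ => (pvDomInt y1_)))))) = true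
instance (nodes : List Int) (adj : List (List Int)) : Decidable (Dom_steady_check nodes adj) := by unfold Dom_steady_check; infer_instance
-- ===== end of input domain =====

-- B computes the column-sum vector by bucketing rows by their spin value (dict value -> row
-- indices, zero spins skipped), summing each bucket's rows once and combining buckets weighted
-- by the value, then compares signs in a separate early-exit pass; A recomputes a full dot
-- product (and copies the whole state) per column.

-- ===== PORT A =====
def evolve_ising (nodes_state : List Int) (adj : List (List Int)) (pos : Int) : List Int :=
  let n : Int := adj.length
  let adj_sum : Int := (PySem.List.pyRange 0 n 1).foldl
    (fun s i => s + PySem.List.pyGetD nodes_state i 0 * PySem.List.pyGetD (PySem.List.pyGetD adj i []) pos 0) 0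
  let buffer := nodes_state
  -- buffer[pos] = v is PySem.List.pySetD, exact for 0 ≤ pos < len (guaranteed by Pre_)
  if adj_sum > 0 then PySem.List.pySetD buffer pos 1
  else if adj_sum < 0 then PySem.List.pySetD buffer pos (-1)
  else PySem.List.pySetD buffer pos (PySem.List.pyGetD buffer pos 0)

def steady_check (nodes : List Int) (adj : List (List Int)) : Bool :=
  let n : Int := adj.length
  let count : Int := (PySem.List.pyRange 0 n 1).foldl
    (fun c i => if PySem.List.pyGetD (evolve_ising nodes adj i) i 0 ≠ PySem.List.pyGetD nodes i 0 then c + 1 else c) 0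
  if count = 0 then true else false

-- ===== PORT B =====
-- Source B's final early-return loop over enumerate(sums)
def checkLoop (nodes : List Int) : List (Int × Int) → Bool
  | [] => true
  | (i, s) :: rest =>
    if s > 0 then (if nodes.getD i.toNat 0 ≠ 1 then false else checkLoop nodes rest)
    else if s < 0 then (if nodes.getD i.toNat 0 ≠ -1 then false else checkLoop nodes rest)
    else checkLoop nodes rest

def steady_check_alt (nodes : List Int) (adj : List (List Int)) : Bool :=
  let n := adj.length
  let groups := (List.range n).foldl
    (fun d i =>
      let v := nodes.getD i 0
      if v = 0 then d else d.modify v [] (· ++ [i]))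
    (PySem.Dict.empty : PySem.Dict Int (List Nat))
  let sums := groups.items.foldl
    (fun sums p =>
      let block := p.2.foldl
        (fun block i => (block.zip (adj.getD i [])).map (fun q => q.1 + q.2))
        (List.replicate n (0 : Int))
      (sums.zip block).map (fun q => q.1 + p.1 * q.2))
    (List.replicate n (0 : Int))
  checkLoop nodes (PySem.List.enumerate sums 0)

-- ===== PRECONDITION & SPEC =====
-- Pre_ excludes exactly the inputs on which A raises IndexError: fewer nodes than adjacency
-- rows, or some adjacency row shorter than the number of rows (adj[i][pos] out of range).
def Pre_steady_check (nodes : List Int) (adj : List (List Int)) : Prop :=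
  adj.length ≤ nodes.length ∧ ∀ row ∈ adj, adj.length ≤ row.length
instance (nodes : List Int) (adj : List (List Int)) : Decidable (Pre_steady_check nodes adj) := by
  unfold Pre_steady_check; infer_instance

def pvWitness_steady_check : List Int × List (List Int) := ([1, -1], [[0, 1], [1, 0]])

def Spec_steady_check (nodes : List Int) (adj : List (List Int)) (out : Bool) : Prop := out = steady_check_alt nodes adj
instance (nodes : List Int) (adj : List (List Int)) (out : Bool) : Decidable (Spec_steady_check nodes adj out) := by unfold Spec_steady_check; infer_instance

-- ===== CLAIM (what is proved, stated in full; the proofs are below) =====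
def Claim_equal_steady_check : Prop := ∀ (nodes : List Int) (adj : List (List Int)), Dom_steady_check nodes adj → Pre_steady_check nodes adj → Spec_steady_check nodes adj (steady_check nodes adj)

-- ===== LEMMAS AND PROOFS =====

-- sum of column `pos` over the first `m` rows
def colSum (nodes : List Int) (adj : List (List Int)) (m pos : Nat) : Int :=
  ((List.range m).map (fun j => nodes.getD j 0 * (adj.getD j []).getD pos 0)).sum

-- node k is unchanged by the update rule
def Fixed (nodes : List Int) (adj : List (List Int)) (k : Nat) : Prop :=
  (if colSum nodes adj adj.length k > 0 then (1 : Int)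
   else if colSum nodes adj adj.length k < 0 then -1
   else nodes.getD k 0) = nodes.getD k 0

-- ---- A side ----

-- A's evolve_ising at its own position computes the update rule on the column sum
lemma evolve_at (nodes : List Int) (adj : List (List Int))
    (hn : adj.length ≤ nodes.length) (k : Nat) (hk : k < adj.length) :
    PySem.List.pyGetD (evolve_ising nodes adj (k : Int)) (k : Int) 0 =
      if colSum nodes adj adj.length k > 0 then 1
      else if colSum nodes adj adj.length k < 0 then -1
      else nodes.getD k 0 := by
  have hkn : k < nodes.length := by omega
  simp only [evolve_ising, PySem.List.pyRange_zero_nat, List.foldl_map,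
    PySem.List.foldl_add, PySem.List.pyGetD_natCast, PySem.List.pySetD_natCast, zero_add]
  have hS : ((List.range adj.length).map
      (fun j => nodes.getD j 0 * (adj.getD j []).getD k 0)).sum = colSum nodes adj adj.length k := rfl
  rw [hS]
  split_ifs with h1 h2 <;> simp [hkn]

lemma A_iff (nodes : List Int) (adj : List (List Int)) (hn : adj.length ≤ nodes.length) :
    steady_check nodes adj = true ↔ ∀ k < adj.length, Fixed nodes adj k := by
  simp only [steady_check]
  have hfun : (fun (c : Int) (i : Int) =>
      if PySem.List.pyGetD (evolve_ising nodes adj i) i 0 ≠ PySem.List.pyGetD nodes i 0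
      then c + 1 else c)
    = (fun (c : Int) (i : Int) =>
      if (decide (PySem.List.pyGetD (evolve_ising nodes adj i) i 0 ≠ PySem.List.pyGetD nodes i 0)) = true
      then c + 1 else c) := by
    funext c i; simp
  rw [hfun, PySem.List.foldl_count_if]
  have key : List.countP
      (fun i => decide (PySem.List.pyGetD (evolve_ising nodes adj i) i 0 ≠ PySem.List.pyGetD nodes i 0))
      (PySem.List.pyRange 0 (adj.length : Int) 1) = 0 ↔ ∀ k < adj.length, Fixed nodes adj k := by
    rw [List.countP_eq_zero]
    constructor
    · intro h k hk
      have hmem : (k : Int) ∈ PySem.List.pyRange 0 (adj.length : Int) 1 := by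
        rw [PySem.List.mem_pyRange_one]; constructor <;> [positivity; exact_mod_cast hk]
      have := h _ hmem
      rw [evolve_at nodes adj hn k hk] at this
      simp only [decide_eq_true_eq, ne_eq, not_not, PySem.List.pyGetD_natCast] at this
      exact this
    · intro h i hi
      rw [PySem.List.mem_pyRange_one] at hi
      obtain ⟨h0, hlt⟩ := hi
      have hk : i.toNat < adj.length := by omega
      have hcast : (i.toNat : Int) = i := Int.toNat_of_nonneg h0
      rw [← hcast, decide_eq_true_eq, evolve_at nodes adj hn i.toNat hk,
        PySem.List.pyGetD_natCast]
      simpa [Fixed] using h i.toNat hk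
  rw [zero_add]
  split_ifs with hc
  · simpa using key.mp (by exact_mod_cast hc)
  · simp only [false_iff]
    intro h
    exact hc (by exact_mod_cast key.mpr h)

-- ---- B side ----

-- the grouping loop with its zero-skip equals the same loop over the nonzero-filtered indices
lemma groups_filter (key : Nat → Int) (l : List Nat) (d : PySem.Dict Int (List Nat)) :
    l.foldl (fun d i => if key i = 0 then d else d.modify (key i) [] (· ++ [i])) d
    = (l.filter (fun i => !(key i == 0))).foldl (fun d i => d.modify (key i) [] (· ++ [i])) d := by
  induction l generalizing d with
  | nil => rfl
  | cons a l ih =>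
      by_cases h : key a = 0 <;> simp [h, ih]

-- each bucket holds exactly the indices with that (nonzero) spin value, in order
lemma groups_getD (nodes : List Int) (n : Nat) (v : Int) (hv : v ≠ 0) :
    ((List.range n).foldl
      (fun d i => if nodes.getD i 0 = 0 then d else d.modify (nodes.getD i 0) [] (· ++ [i]))
      (PySem.Dict.empty : PySem.Dict Int (List Nat))).getD v []
    = (List.range n).filter (fun i => nodes.getD i 0 == v) := by
  rw [groups_filter (fun i => nodes.getD i 0)]
  have hmap : ((List.range n).filter (fun i => !(nodes.getD i 0 == 0))).foldl
      (fun d i => d.modify (nodes.getD i 0) [] (· ++ [i])) PySem.Dict.empty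
    = (((List.range n).filter (fun i => !(nodes.getD i 0 == 0))).map
        (fun i => (nodes.getD i 0, i))).foldl
      (fun d p => d.modify p.1 [] (· ++ [p.2])) PySem.Dict.empty := by
    rw [List.foldl_map]
  rw [hmap, PySem.Dict.getD_foldl_modify_append]
  simp only [PySem.Dict.getD_empty, List.nil_append, List.filter_map, List.filter_filter]
  have hcond : (fun a => ((fun p => (p : Int × Nat).1 == v) ∘ fun i => (nodes.getD i 0, i)) a
      && !(nodes.getD a 0 == 0)) = fun i => nodes.getD i 0 == v := by
    funext i
    show ((nodes.getD i 0 == v) && !(nodes.getD i 0 == 0)) = (nodes.getD i 0 == v)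
    generalize nodes.getD i 0 = x
    by_cases h : x = v
    · rw [h]; simp [hv]
    · simp [h]
  rw [hcond]
  have hid : ((fun x => (x : Int × Nat).2) ∘ fun i => (nodes.getD i 0, i)) = id := rfl
  rw [List.map_map, hid, List.map_id]

-- the inner zip-fold adds, per position, the sum of the rows of the given indices
lemma zipfold_spec (adj : List (List Int)) (n : Nat) (l : List Nat)
    (hrows : ∀ i ∈ l, n ≤ (adj.getD i []).length) :
    ∀ init : List Int, init.length = n →
      (l.foldl (fun b i => (b.zip (adj.getD i [])).map (fun q => q.1 + q.2)) init).length = n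
      ∧ ∀ pos < n,
        (l.foldl (fun b i => (b.zip (adj.getD i [])).map (fun q => q.1 + q.2)) init).getD pos 0
          = init.getD pos 0 + (l.map (fun i => (adj.getD i []).getD pos 0)).sum := by
  induction l with
  | nil => intro init h; simp [h]
  | cons a l ih =>
      intro init hinit
      have ha : n ≤ (adj.getD a []).length := hrows a (by simp)
      have hlen : ((init.zip (adj.getD a [])).map (fun q => q.1 + q.2)).length = n := by
        rw [List.length_map, List.length_zip, hinit]; omega
      obtain ⟨ihl, ihg⟩ := ih (fun i hi => hrows i (by simp [hi])) _ hlen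
      refine ⟨by simpa using ihl, ?_⟩
      intro pos hpos
      rw [List.foldl_cons, ihg pos hpos]
      have hz : ((init.zip (adj.getD a [])).map (fun q => q.1 + q.2)).getD pos 0
          = init.getD pos 0 + (adj.getD a []).getD pos 0 := by
        have h1 : pos < init.length := by omega
        have h2 : pos < (adj.getD a []).length := by omega
        rw [List.getD_eq_getElem _ _ (by rw [hlen]; exact hpos),
          List.getD_eq_getElem _ _ h1, List.getD_eq_getElem _ _ h2]
        simp
      rw [hz]
      simp [add_assoc]

-- the outer combine pass accumulates each bucket's weighted row-sum
lemma outer_spec (adj : List (List Int)) (n : Nat) (items : List (Int × List Nat))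
    (hrows : ∀ p ∈ items, ∀ i ∈ p.2, n ≤ (adj.getD i []).length) :
    ∀ init : List Int, init.length = n →
      (items.foldl (fun sums p =>
          (sums.zip (p.2.foldl
            (fun b i => (b.zip (adj.getD i [])).map (fun q => q.1 + q.2))
            (List.replicate n (0 : Int)))).map (fun q => q.1 + p.1 * q.2)) init).length = n
      ∧ ∀ pos < n,
        (items.foldl (fun sums p =>
          (sums.zip (p.2.foldl
            (fun b i => (b.zip (adj.getD i [])).map (fun q => q.1 + q.2))
            (List.replicate n (0 : Int)))).map (fun q => q.1 + p.1 * q.2)) init).getD pos 0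
          = init.getD pos 0
            + (items.map (fun p => p.1 * (p.2.map (fun i => (adj.getD i []).getD pos 0)).sum)).sum := by
  induction items with
  | nil => intro init h; simp [h]
  | cons p items ih =>
      intro init hinit
      obtain ⟨bl, bg⟩ := zipfold_spec adj n p.2 (hrows p (by simp)) (List.replicate n 0) (by simp)
      have hlen : ((init.zip (p.2.foldl
            (fun b i => (b.zip (adj.getD i [])).map (fun q => q.1 + q.2))
            (List.replicate n (0 : Int)))).map (fun q => q.1 + p.1 * q.2)).length = n := by
        rw [List.length_map, List.length_zip, hinit, bl]; omega
      obtain ⟨ihl, ihg⟩ := ih (fun q hq => hrows q (by simp [hq])) _ hlen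
      refine ⟨by simpa using ihl, ?_⟩
      intro pos hpos
      rw [List.foldl_cons, ihg pos hpos]
      have hz : ((init.zip (p.2.foldl
            (fun b i => (b.zip (adj.getD i [])).map (fun q => q.1 + q.2))
            (List.replicate n (0 : Int)))).map (fun q => q.1 + p.1 * q.2)).getD pos 0
          = init.getD pos 0 + p.1 * (p.2.map (fun i => (adj.getD i []).getD pos 0)).sum := by
        have h1 : pos < init.length := by omega
        have h2 : pos < (p.2.foldl
            (fun b i => (b.zip (adj.getD i [])).map (fun q => q.1 + q.2))
            (List.replicate n (0 : Int))).length := by omega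
        rw [List.getD_eq_getElem _ _ (by rw [hlen]; exact hpos),
          List.getD_eq_getElem _ _ h1]
        simp only [List.getElem_map, List.getElem_zip]
        rw [← List.getD_eq_getElem _ (0 : Int) h2, bg pos hpos]
        simp
      rw [hz]
      simp [add_assoc]

-- a sum with at most one matching key
lemma single_sum (K : List Int) (hnd : K.Nodup) (c x : Int) :
    (K.map (fun v => if c = v then v * x else 0)).sum = if c ∈ K then c * x else 0 := by
  induction K with
  | nil => simp
  | cons a K ih =>
      simp only [List.nodup_cons] at hnd
      by_cases h : c = a
      · subst h
        simp [ih hnd.2, hnd.1]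
      · simp [h, ih hnd.2]

-- fibre-wise summation: summing buckets weighted by their key recovers the direct sum
lemma fiber_sum (key : Nat → Int) (r : Nat → Int) (K : List Int) (hnd : K.Nodup)
    (h0 : (0 : Int) ∉ K) (l : List Nat) (hcov : ∀ i ∈ l, key i ≠ 0 → key i ∈ K) :
    (K.map (fun v => v * ((l.filter (fun i => key i == v)).map r).sum)).sum
    = (l.map (fun i => key i * r i)).sum := by
  induction l with
  | nil => simp
  | cons a l ih =>
      have hstep : ∀ v : Int,
          v * (((a :: l).filter (fun i => key i == v)).map r).sum
          = (if key a = v then v * r a else 0) + v * ((l.filter (fun i => key i == v)).map r).sum := by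
        intro v
        by_cases h : key a = v
        · simp [h]; ring
        · simp [h]
      simp only [hstep]
      rw [PySem.List.sum_map_add_int]
      rw [ih (fun i hi h => hcov i (by simp [hi]) h)]
      have hsingle := single_sum K hnd (key a) (r a)
      by_cases hz : key a = 0
      · have hall : ∀ v ∈ K, (if key a = v then v * r a else 0) = 0 := by
          intro v hv
          have : key a ≠ v := fun he => h0 (hz ▸ he ▸ hv)
          simp [this]
        rw [List.sum_eq_zero (by
          intro x hx; obtain ⟨v, hv, rfl⟩ := List.mem_map.mp hx; exact hall v hv)]
        simp [hz]
      · have hmem : key a ∈ K := hcov a (by simp) hz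
        have hone : (K.map (fun v => if key a = v then v * r a else 0)).sum = key a * r a := by
          rw [hsingle]; simp [hmem]
        rw [hone]
        simp

lemma checkLoop_iff (nodes : List Int) (ps : List (Int × Int)) :
    checkLoop nodes ps = true ↔ ∀ p ∈ ps,
      (p.2 > 0 → nodes.getD p.1.toNat 0 = 1) ∧ (p.2 < 0 → nodes.getD p.1.toNat 0 = -1) := by
  induction ps with
  | nil => simp [checkLoop]
  | cons p ps ih =>
      obtain ⟨i, s⟩ := p
      rw [List.forall_mem_cons]
      simp only [checkLoop]
      split_ifs with h1 h2 h3 h4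
      · simp only [false_iff]; rintro ⟨⟨ha, _⟩, _⟩; exact h2 (ha h1)
      · rw [ih]; have hx : nodes.getD i.toNat 0 = 1 := not_not.mp h2
        constructor
        · intro h; exact ⟨⟨fun _ => hx, fun hs => absurd h1 (by omega)⟩, h⟩
        · exact fun h => h.2
      · simp only [false_iff]; rintro ⟨⟨_, hb⟩, _⟩; exact h4 (hb h3)
      · rw [ih]; have hx : nodes.getD i.toNat 0 = -1 := not_not.mp h4
        constructor
        · intro h; exact ⟨⟨fun hs => absurd h3 (by omega), fun _ => hx⟩, h⟩
        · exact fun h => h.2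
      · rw [ih]
        constructor
        · intro h; exact ⟨⟨fun hs => absurd hs h1, fun hs => absurd hs h3⟩, h⟩
        · exact fun h => h.2

lemma B_iff (nodes : List Int) (adj : List (List Int))
    (hrow : ∀ row ∈ adj, adj.length ≤ row.length) :
    steady_check_alt nodes adj = true ↔ ∀ k < adj.length, Fixed nodes adj k := by
  have hval : steady_check_alt nodes adj
      = checkLoop nodes (PySem.List.enumerate
          (((List.range adj.length).foldl
              (fun d i => if nodes.getD i 0 = 0 then d else d.modify (nodes.getD i 0) [] (· ++ [i]))
              (PySem.Dict.empty : PySem.Dict Int (List Nat))).items.foldl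
            (fun sums p =>
              (sums.zip (p.2.foldl
                (fun b i => (b.zip (adj.getD i [])).map (fun q => q.1 + q.2))
                (List.replicate adj.length (0 : Int)))).map (fun q => q.1 + p.1 * q.2))
            (List.replicate adj.length (0 : Int))) 0) := rfl
  set n := adj.length with hn
  set G := (List.range n).foldl
      (fun d i => if nodes.getD i 0 = 0 then d else d.modify (nodes.getD i 0) [] (· ++ [i]))
      (PySem.Dict.empty : PySem.Dict Int (List Nat)) with hG
  set S := G.items.foldl
      (fun sums p =>
        (sums.zip (p.2.foldl
          (fun b i => (b.zip (adj.getD i [])).map (fun q => q.1 + q.2))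
          (List.replicate n (0 : Int)))).map (fun q => q.1 + p.1 * q.2))
      (List.replicate n (0 : Int)) with hS
  rw [hval, checkLoop_iff]
  -- keys of the bucket dict
  have hkeys : G.keys = PySem.Set.ofList (((List.range n).filter
      (fun i => !(nodes.getD i 0 == 0))).map (fun i => nodes.getD i 0)) := by
    rw [hG, groups_filter (fun i => nodes.getD i 0), PySem.Dict.keys_foldl_modify_key,
      PySem.Dict.keys_empty, PySem.Set.update_nil_left]
  have hnd : G.keys.Nodup := by rw [hkeys]; exact PySem.Set.nodup_ofList _
  have hKne : ∀ v ∈ G.keys, v ≠ 0 := by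
    intro v hv
    rw [hkeys, PySem.Set.mem_ofList] at hv
    obtain ⟨i, hi, rfl⟩ := List.mem_map.mp hv
    simpa using (List.mem_filter.mp hi).2
  have hK0 : (0 : Int) ∉ G.keys := fun h => hKne 0 h rfl
  have hcov : ∀ i ∈ List.range n, nodes.getD i 0 ≠ 0 → nodes.getD i 0 ∈ G.keys := by
    intro i hi h0
    rw [hkeys, PySem.Set.mem_ofList]
    exact List.mem_map.mpr ⟨i, List.mem_filter.mpr ⟨hi, by simpa using h0⟩, rfl⟩
  have hgetD : ∀ v ∈ G.keys, G.getD v []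
      = (List.range n).filter (fun i => nodes.getD i 0 == v) := by
    intro v hv
    rw [hG]; exact groups_getD nodes n v (hKne v hv)
  have hitems : G.items = G.keys.map (fun v => (v, G.getD v [])) :=
    PySem.Dict.items_eq_map_keys G hnd []
  have hrows : ∀ p ∈ G.items, ∀ i ∈ p.2, n ≤ (adj.getD i []).length := by
    intro p hp i hip
    rw [hitems] at hp
    obtain ⟨v, hv, rfl⟩ := List.mem_map.mp hp
    rw [hgetD v hv] at hip
    have hilt : i < n := by simpa using (List.mem_filter.mp hip).1
    have hmemrow : adj.getD i [] ∈ adj := by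
      rw [List.getD_eq_getElem _ _ (hn ▸ hilt)]
      exact List.getElem_mem _
    exact hrow _ hmemrow
  obtain ⟨hslen, hsget⟩ := outer_spec adj n G.items hrows (List.replicate n 0) (by simp)
  rw [← hS] at hslen hsget
  have hsum : ∀ pos, pos < n → S.getD pos 0 = colSum nodes adj n pos := by
    intro pos hpos
    rw [hsget pos hpos, hitems, List.map_map]
    have hcong : ∀ v ∈ G.keys,
        ((fun p : Int × List Nat => p.1 * (p.2.map (fun i => (adj.getD i []).getD pos 0)).sum)
          ∘ (fun v => (v, G.getD v []))) v
        = v * (((List.range n).filter (fun i => nodes.getD i 0 == v)).map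
            (fun i => (adj.getD i []).getD pos 0)).sum := by
      intro v hv
      simp only [Function.comp_apply]
      rw [hgetD v hv]
    rw [List.map_congr_left hcong,
      fiber_sum (fun i => nodes.getD i 0) (fun i => (adj.getD i []).getD pos 0)
        G.keys hnd hK0 (List.range n) hcov]
    simp [colSum]
  constructor
  · intro h k hk
    have hk' : k < S.length := by rw [hslen]; exact hk
    have hsk : S[k] = colSum nodes adj n k := by
      rw [← List.getD_eq_getElem S 0 hk']; exact hsum k hk
    obtain ⟨h1, h2⟩ := h ((0 : Int) + (k : Nat), S[k])
      ((PySem.List.mem_enumerate_iff S 0 _).mpr ⟨k, hk', rfl⟩)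
    simp only [zero_add, Int.toNat_natCast] at h1 h2
    rw [hsk] at h1 h2
    unfold Fixed
    rw [← hn]
    split_ifs with hc1 hc2
    · exact (h1 hc1).symm
    · exact (h2 hc2).symm
    · rfl
  · intro h p hp
    obtain ⟨k, hk', rfl⟩ := (PySem.List.mem_enumerate_iff S 0 p).mp hp
    have hk : k < n := by rw [← hslen]; exact hk'
    have hsk : S[k] = colSum nodes adj n k := by
      rw [← List.getD_eq_getElem S 0 hk']; exact hsum k hk
    have hfix := h k (hn ▸ hk)
    unfold Fixed at hfix
    rw [← hn] at hfix
    simp only [zero_add, Int.toNat_natCast, hsk]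
    constructor
    · intro hpos
      rw [if_pos hpos] at hfix
      exact hfix.symm
    · intro hneg
      rw [if_neg (by omega), if_pos hneg] at hfix
      exact hfix.symm

-- ===== VERDICT (by name: the statement is the Claim_ definition above) =====
theorem steady_check_spec : Claim_equal_steady_check := by
  intro nodes adj _ hpre
  obtain ⟨hn, hrow⟩ := hpre
  unfold Spec_steady_check
  rw [Bool.eq_iff_iff, A_iff nodes adj hn, B_iff nodes adj hrow]
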